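-- pv_equiv track=rewrite | github.com/kevinxucong/4D_Automark | Automark_4D/srgrow_poisson_t_multi_band_exptime.py | standardize_init_seeds
-- ===== SOURCE A (Python) =====
-- def standardize_init_seeds(old_label):
--     d = {}
--     new_label = list(old_label)
--     count = 0
--     for i,c in enumerate(new_label):
--         if c == -1:
--             continue
--         if c not in d:
--             d[c] = count
--             count += 1
--         new_label[i] = d[c]
--     return new_label
-- ===== SOURCE B (Python) =====
-- def standardize_init_seeds(old_label):
--     # Sort-based coordinate compression: no value-keyed dictionary.
--     # 1) sort (value, index) pairs; equal values form runs whose head carries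
--     #    the smallest index, i.e. the value's first-occurrence position;
--     # 2) the sorted list of those first-occurrence positions gives each value
--     #    its rank (= first-appearance order), held in a position-indexed array;
--     # 3) a second run sweep writes each element's rank into the result array.
--     n = len(old_label)
--     pairs = sorted((c, i) for i, c in enumerate(old_label) if c != -1)
--     firsts = []
--     prev = -1
--     for c, i in pairs:
--         if c != prev:
--             firsts.append(i)
--             prev = c
--     firsts.sort()
--     rank = [0] * n
--     for r, f in enumerate(firsts):
--         rank[f] = r
--     result = [-1] * n
--     prev = -1
--     f = -1
--     for c, i in pairs:
--         if c != prev: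
--             f = i
--             prev = c
--         result[i] = rank[f]
--     return result
-- ===== Notes on version B (the rewrite author's own statement) =====
-- stated objective: alternative
-- what changed: A's single pass with a first-appearance dict counter is replaced by sort-based coordinate compression: sort (value,index) pairs, take equal-value run heads as first-occurrence positions, sort those to get ranks in two position-indexed arrays, then a second run sweep writes the result; no value-keyed dictionary at all.
import Mathlib
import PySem

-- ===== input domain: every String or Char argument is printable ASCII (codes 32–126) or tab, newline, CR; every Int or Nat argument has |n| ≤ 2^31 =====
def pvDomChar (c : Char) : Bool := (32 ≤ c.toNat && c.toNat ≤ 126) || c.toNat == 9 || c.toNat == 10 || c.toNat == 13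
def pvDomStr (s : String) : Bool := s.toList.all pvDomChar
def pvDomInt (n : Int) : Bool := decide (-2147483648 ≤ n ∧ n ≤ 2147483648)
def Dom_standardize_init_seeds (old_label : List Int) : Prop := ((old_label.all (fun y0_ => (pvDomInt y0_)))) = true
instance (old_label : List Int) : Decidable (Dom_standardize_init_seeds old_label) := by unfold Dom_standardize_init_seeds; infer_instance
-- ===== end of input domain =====

-- B replaces A's first-appearance dict counter by sort-based coordinate compression (pairs sort + run heads + position-indexed arrays); alternative algorithm, same return values.


-- ===== PORT A =====
-- A walks the list once, overwriting new_label[i]; since positions are visited in order this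
-- structural recursion over the remaining list with the evolving dict/count is its loop, step for step.
-- d.getD c 0 ports d[c]: the key is present on both branches where it is read, so the default is never used.
def pvGoA (d : PySem.Dict Int Int) (count : Int) : List Int → List Int
  | [] => []
  | c :: rest =>
    if c == -1 then c :: pvGoA d count rest
    else if d.contains c then d.getD c 0 :: pvGoA d count rest
    else count :: pvGoA (d.insert c count) (count + 1) rest

def standardize_init_seeds (old_label : List Int) : List Int :=
  pvGoA PySem.Dict.empty 0 old_label

-- ===== PORT B =====
-- Transliteration of Source B. rank[f] / result[i] reads and writes are pyGetD / pySetD (indices are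
-- always in range here, as in the Python). The two run sweeps carry their (prev[, f]) state.
def standardize_init_seeds_alt (old_label : List Int) : List Int :=
  let n := old_label.length
  let pairs := PySem.List.sorted2
      (((PySem.List.enumerate old_label).filter (fun p => p.2 != -1)).map (fun p => (p.2, p.1)))
      Prod.fst Prod.snd
  let firsts := (pairs.foldl
      (fun (st : List Int × Int) p => if p.1 != st.2 then (st.1 ++ [p.2], p.1) else st)
      ([], -1)).1
  let firstsS := PySem.List.sorted firsts (fun x => x)
  let rank := (PySem.List.enumerate firstsS).foldl
      (fun acc p => PySem.List.pySetD acc p.2 p.1) (List.replicate n (0 : Int))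
  (pairs.foldl
      (fun (st : List Int × Int × Int) p =>
        let prev := st.2.1
        let f := if p.1 != prev then p.2 else st.2.2
        let prev' := if p.1 != prev then p.1 else prev
        (PySem.List.pySetD st.1 p.2 (PySem.List.pyGetD rank f 0), prev', f))
      (List.replicate n (-1 : Int), -1, -1)).1

-- ===== PRECONDITION & SPEC =====
def Spec_standardize_init_seeds (old_label : List Int) (out : List Int) : Prop := out = standardize_init_seeds_alt old_label
instance (old_label : List Int) (out : List Int) : Decidable (Spec_standardize_init_seeds old_label out) := by unfold Spec_standardize_init_seeds; infer_instance

-- ===== CLAIM (what is proved, stated in full; the proofs are below) =====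
def Claim_equal_standardize_init_seeds : Prop := ∀ (old_label : List Int), Dom_standardize_init_seeds old_label → Spec_standardize_init_seeds old_label (standardize_init_seeds old_label)

-- ===== LEMMAS AND PROOFS =====

-- ---------- common spec objects ----------

-- the seen-list after A's loop has consumed xs, starting from seen-list S (first-appearance order)
def pvSeen (S : List Int) : List Int → List Int
  | [] => S
  | c :: xs => if c = -1 ∨ c ∈ S then pvSeen S xs else pvSeen (S ++ [c]) xs

-- the common target value: relabel c by its first-appearance rank
def pvM (xs : List Int) : List Int :=
  xs.map (fun c => if c == -1 then (-1 : Int) else (((pvSeen [] xs).idxOf c : Nat) : Int))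

-- ---------- A side (dict/count loop = idxOf in the seen list) ----------

def pvDict (S : List Int) : PySem.Dict Int Int :=
  (PySem.List.enumerate S).foldl (fun d p => d.insert p.2 p.1) PySem.Dict.empty

lemma pvDict_items (S : List Int) (h : S.Nodup) :
    (pvDict S).items = (PySem.List.enumerate S).map (fun p => (p.2, p.1)) := by
  have := PySem.Dict.items_foldl_insert_fresh (l := PySem.List.enumerate S)
      (k := fun p => p.2) (v := fun p => p.1) (d := PySem.Dict.empty)
      (by intro a _; rfl)
      (by simpa [PySem.List.map_snd_enumerate] using h)
  simpa [pvDict] using this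

lemma pvDict_keys_nodup (S : List Int) : (pvDict S).keys.Nodup := by
  exact PySem.Dict.nodup_keys_foldl_insert_key _ _ _ _ PySem.Dict.nodup_keys_empty

lemma pvDict_contains (S : List Int) (c : Int) :
    (pvDict S).contains c = decide (c ∈ S) := by
  rw [PySem.Dict.contains_eq_decide_mem_keys]
  unfold pvDict
  rw [PySem.Dict.keys_foldl_insert_key]
  simp [PySem.List.map_snd_enumerate, PySem.Set.update_nil_left, PySem.Set.mem_ofList]

lemma pvDict_getD (S : List Int) (h : S.Nodup) (c : Int) (hc : c ∈ S) :
    (pvDict S).getD c 0 = (S.idxOf c : Int) := by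
  have hk : S.idxOf c < S.length := List.idxOf_lt_length_of_mem hc
  have hmem : (c, (S.idxOf c : Int)) ∈ (pvDict S).items := by
    rw [pvDict_items S h]
    refine List.mem_map.mpr ⟨((S.idxOf c : Int), c), ?_, rfl⟩
    rw [PySem.List.mem_enumerate_iff]
    exact ⟨S.idxOf c, hk, by simp [List.getElem_idxOf hk]⟩
  exact PySem.Dict.getD_of_mem_items (pvDict S) hmem (pvDict_keys_nodup S) 0

lemma pvDict_snoc (S : List Int) (c : Int) :
    pvDict (S ++ [c]) = (pvDict S).insert c (S.length : Int) := by
  unfold pvDict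
  rw [PySem.List.enumerate_append, List.foldl_append]
  simp [PySem.List.enumerate]

lemma pvSeen_prefix (xs S : List Int) : ∃ T, pvSeen S xs = S ++ T := by
  induction xs generalizing S with
  | nil => exact ⟨[], by simp [pvSeen]⟩
  | cons c xs ih =>
    by_cases h : c = -1 ∨ c ∈ S
    · obtain ⟨T, hT⟩ := ih S
      exact ⟨T, by simpa [pvSeen, h] using hT⟩
    · obtain ⟨T, hT⟩ := ih (S ++ [c])
      exact ⟨c :: T, by simp [pvSeen, h, hT]⟩

lemma pvSeen_eq_foldl (xs S : List Int) :
    pvSeen S xs = (xs.filter (fun c => c != -1)).foldl PySem.Set.add S := by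
  induction xs generalizing S with
  | nil => simp [pvSeen]
  | cons c xs ih =>
    by_cases hc : c = -1
    · simp [pvSeen, hc, ih]
    · by_cases hm : c ∈ S
      · simp [pvSeen, hc, hm, ih, PySem.Set.add, PySem.Set.contains, List.elem_eq_mem, hm]
      · simp [pvSeen, hc, hm, ih, PySem.Set.add, PySem.Set.contains, List.elem_eq_mem, hm]

lemma pvSeen_nil_eq_dedup (xs : List Int) :
    pvSeen [] xs = PySem.List.dedup (xs.filter (fun c => c != -1)) := by
  rw [pvSeen_eq_foldl, PySem.List.dedup_eq_ofList, PySem.Set.ofList_eq_foldl]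

lemma pvGoA_eq (xs : List Int) : ∀ S : List Int, S.Nodup → (-1 : Int) ∉ S →
    pvGoA (pvDict S) (S.length : Int) xs
      = xs.map (fun c => if c == -1 then (-1 : Int) else (((pvSeen S xs).idxOf c : Nat) : Int)) := by
  induction xs with
  | nil => intro S _ _; simp [pvGoA]
  | cons c xs ih =>
    intro S hnd hm1
    by_cases hc : c = -1
    · simp [pvGoA, pvSeen, hc, ih S hnd hm1]
    · by_cases hm : c ∈ S
      · obtain ⟨T, hT⟩ := pvSeen_prefix xs S
        have hidx : (pvSeen S xs).idxOf c = S.idxOf c := by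
          rw [hT]; exact List.idxOf_append_of_mem hm
        simp [pvGoA, pvSeen, hc, hm, pvDict_contains, pvDict_getD S hnd c hm,
              ih S hnd hm1, hidx]
      · obtain ⟨T, hT⟩ := pvSeen_prefix xs (S ++ [c])
        have hidx : (pvSeen (S ++ [c]) xs).idxOf c = S.length := by
          rw [hT, List.append_assoc, List.idxOf_append_of_notMem hm]
          simp [List.idxOf_cons_self]
        have hnd' : (S ++ [c]).Nodup := by
          simp [List.nodup_append, hnd]
          intro a ha heq
          exact hm (heq ▸ ha)
        have hm1' : (-1 : Int) ∉ S ++ [c] := by simp [hm1, Ne.symm hc]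
        have hrec := ih (S ++ [c]) hnd' hm1'
        rw [pvDict_snoc] at hrec
        have hrec' : pvGoA ((pvDict S).insert c (S.length : Int)) ((S.length : Int) + 1) xs
            = xs.map (fun c' => if c' == -1 then (-1 : Int) else (((pvSeen (S ++ [c]) xs).idxOf c' : Nat) : Int)) := by
          simpa using hrec
        simp [pvGoA, pvSeen, hc, hm, pvDict_contains, hrec', hidx]

lemma pvA_eq_M (xs : List Int) : standardize_init_seeds xs = pvM xs := by
  have := pvGoA_eq xs [] List.nodup_nil (by simp)
  simpa [standardize_init_seeds, pvM, pvDict, PySem.List.enumerate] using this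

-- ---------- B side: the lexicographic sort ----------

def pvR (a b : Int × Int) : Prop := a.1 < b.1 ∨ (a.1 = b.1 ∧ a.2 < b.2)

def pvBefore (a b : Int × Int) : Bool :=
  decide (a.1 < b.1) || (!decide (b.1 < a.1) && decide (a.2 < b.2))

lemma pvBefore_iff (a b : Int × Int) : pvBefore a b = true ↔ pvR a b := by
  unfold pvBefore pvR
  rcases lt_trichotomy a.1 b.1 with h | h | h <;> simp [h, not_lt_of_gt] <;> omega

lemma pvR_total (a b : Int × Int) (h : a ≠ b) : pvR a b ∨ pvR b a := by
  rcases a with ⟨a1, a2⟩; rcases b with ⟨b1, b2⟩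
  have hne : a1 ≠ b1 ∨ a2 ≠ b2 := by
    by_contra hc; push_neg at hc; exact h (by simp [hc.1, hc.2])
  unfold pvR; dsimp only; omega

lemma pvR_trans (a b c : Int × Int) (h1 : pvR a b) (h2 : pvR b c) : pvR a c := by
  unfold pvR at *; omega

lemma pvR_irrefl (a b : Int × Int) (h1 : pvR a b) (h2 : pvR b a) : False := by
  unfold pvR at *; omega

lemma pvR_ne (a b : Int × Int) (h : pvR a b) : a ≠ b := by
  intro he; subst he; exact pvR_irrefl a a h h

lemma perm_insertBy (x : Int × Int) (ys : List (Int × Int)) :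
    (PySem.List.insertBy pvBefore x ys).Perm (x :: ys) := by
  induction ys with
  | nil => simp [PySem.List.insertBy]
  | cons y ys ih =>
    unfold PySem.List.insertBy
    split
    · rfl
    · exact ((ih.cons y).trans (List.Perm.swap x y ys))

lemma pairwise_insertBy (x : Int × Int) (ys : List (Int × Int))
    (hp : ys.Pairwise pvR) (hx : x ∉ ys) :
    (PySem.List.insertBy pvBefore x ys).Pairwise pvR := by
  induction ys with
  | nil => simp [PySem.List.insertBy]
  | cons y ys ih =>
    rw [List.pairwise_cons] at hp
    unfold PySem.List.insertBy
    split
    · rename_i hb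
      rw [pvBefore_iff] at hb
      refine List.pairwise_cons.mpr ⟨?_, List.pairwise_cons.mpr hp⟩
      intro z hz
      rcases List.mem_cons.mp hz with h | h
      · exact h ▸ hb
      · exact pvR_trans _ _ _ hb (hp.1 z h)
    · rename_i hb
      have hxy : x ≠ y := fun he => hx (he ▸ List.mem_cons_self)
      have hyx : pvR y x := by
        rcases pvR_total x y hxy with h | h
        · exact absurd ((pvBefore_iff x y).mpr h) (by simpa using hb)
        · exact h
      refine List.pairwise_cons.mpr ⟨?_, ih hp.2 (fun hm => hx (List.mem_cons_of_mem _ hm))⟩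
      intro z hz
      have := (perm_insertBy x ys).mem_iff.mp hz
      rcases List.mem_cons.mp this with h | h
      · exact h ▸ hyx
      · exact hp.1 z h

lemma foldl_insertBy_spec (l acc : List (Int × Int))
    (hnd : (acc ++ l).Nodup) (hacc : acc.Pairwise pvR) :
    (l.foldl (fun a x => PySem.List.insertBy pvBefore x a) acc).Perm (acc ++ l)
    ∧ (l.foldl (fun a x => PySem.List.insertBy pvBefore x a) acc).Pairwise pvR := by
  induction l generalizing acc with
  | nil => exact ⟨by simp, hacc⟩
  | cons x l ih =>
    have hxacc : x ∉ acc := by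
      intro hm
      obtain ⟨-, -, hdisj⟩ := List.nodup_append.mp hnd
      exact hdisj x hm x List.mem_cons_self rfl
    have hperm1 : (PySem.List.insertBy pvBefore x acc).Perm (x :: acc) := perm_insertBy x acc
    have hpermA : ((PySem.List.insertBy pvBefore x acc) ++ l).Perm (acc ++ x :: l) := by
      refine (hperm1.append_right l).trans ?_
      rw [List.cons_append]
      exact List.perm_middle.symm
    have hnd' : ((PySem.List.insertBy pvBefore x acc) ++ l).Nodup := hpermA.nodup_iff.mpr hnd
    have hpw' : (PySem.List.insertBy pvBefore x acc).Pairwise pvR :=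
      pairwise_insertBy x acc hacc hxacc
    obtain ⟨p, q⟩ := ih (PySem.List.insertBy pvBefore x acc) hnd' hpw'
    exact ⟨by simpa using p.trans hpermA, by simpa using q⟩

lemma pvR_sorted_unique (l m : List (Int × Int)) (hp : l.Perm m)
    (h1 : l.Pairwise pvR) (h2 : m.Pairwise pvR) : l = m := by
  induction l generalizing m with
  | nil => simpa using hp.nil_eq
  | cons a l ih =>
    rcases m with _ | ⟨b, m⟩
    · exact absurd hp.symm.nil_eq (by simp)
    · by_cases hab : a = b
      · subst hab
        have := ih m (hp.cons_inv) (List.pairwise_cons.mp h1).2 (List.pairwise_cons.mp h2).2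
        rw [this]
      · exfalso
        have ham : a ∈ b :: m := hp.mem_iff.mp List.mem_cons_self
        have hbm : b ∈ a :: l := hp.symm.mem_iff.mp List.mem_cons_self
        have h1' : pvR a b := (List.pairwise_cons.mp h1).1 b (by
          rcases List.mem_cons.mp hbm with h | h
          · exact absurd h.symm hab
          · exact h)
        have h2' : pvR b a := (List.pairwise_cons.mp h2).1 a (by
          rcases List.mem_cons.mp ham with h | h
          · exact absurd h hab
          · exact h)
        exact pvR_irrefl a b h1' h2'

lemma sorted2_eq_canon (X P : List (Int × Int)) (hnd : X.Nodup)
    (hperm : P.Perm X) (hp : P.Pairwise pvR) :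
    PySem.List.sorted2 X Prod.fst Prod.snd = P := by
  have hdef : PySem.List.sorted2 X Prod.fst Prod.snd
      = X.foldl (fun a x => PySem.List.insertBy pvBefore x a) [] := rfl
  obtain ⟨p, q⟩ := foldl_insertBy_spec X [] (by simpa using hnd) (by simp)
  rw [hdef]
  exact pvR_sorted_unique _ _ (p.trans (by simpa using hperm.symm)) q hp

-- ---------- B side: canonical objects ----------

-- positions of v in l, counting from s (ascending)
def pvIdxs (s : Int) : List Int → Int → List Int
  | [], _ => []
  | x :: t, v => if x = v then s :: pvIdxs (s + 1) t v else pvIdxs (s + 1) t v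

def pvFI (xs : List Int) (v : Int) : Int := (xs.idxOf v : Int)

def pvV (xs : List Int) : List Int := PySem.List.sorted (pvSeen [] xs) (fun x => x)

def pvP (xs : List Int) : List (Int × Int) :=
  (pvV xs).flatMap (fun v => (pvIdxs 0 xs v).map (fun i => (v, i)))

def pvX (xs : List Int) : List (Int × Int) :=
  ((PySem.List.enumerate xs).filter (fun p => p.2 != -1)).map (fun p => (p.2, p.1))

lemma pvIdxs_mem (l : List Int) : ∀ (s i v : Int),
    (i ∈ pvIdxs s l v ↔ ∃ (k : Nat), ∃ (hk : k < l.length), l[k] = v ∧ i = s + k) := by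
  induction l with
  | nil => intro s i v; simp [pvIdxs]
  | cons x t ih =>
    intro s i v
    have hstep : pvIdxs s (x :: t) v
        = if x = v then s :: pvIdxs (s + 1) t v else pvIdxs (s + 1) t v := rfl
    by_cases hx : x = v
    · rw [hstep, if_pos hx]
      constructor
      · intro hmem
        rcases List.mem_cons.mp hmem with rfl | hm
        · exact ⟨0, by simp, by simpa using hx, by simp⟩
        · obtain ⟨k, hk, hkv, rfl⟩ := (ih (s + 1) i v).mp hm
          exact ⟨k + 1, by simpa using hk, by simpa using hkv, by push_cast; ring⟩
      · rintro ⟨k, hk, hkv, rfl⟩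
        cases k with
        | zero => simp
        | succ k =>
          refine List.mem_cons_of_mem _ ((ih (s + 1) _ v).mpr ⟨k, by simpa using hk, by simpa using hkv, by push_cast; ring⟩)
    · rw [hstep, if_neg hx]
      rw [ih (s + 1) i v]
      constructor
      · rintro ⟨k, hk, hkv, rfl⟩
        exact ⟨k + 1, by simpa using hk, by simpa using hkv, by push_cast; ring⟩
      · rintro ⟨k, hk, hkv, rfl⟩
        cases k with
        | zero => exact absurd (by simpa using hkv) hx
        | succ k =>
          exact ⟨k, by simpa using hk, by simpa using hkv, by push_cast; ring⟩

lemma pvIdxs_ge (l : List Int) : ∀ (s i v : Int), i ∈ pvIdxs s l v → s ≤ i := by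
  intro s i v h
  obtain ⟨k, hk, -, rfl⟩ := (pvIdxs_mem l s i v).mp h
  omega

lemma pvIdxs_pairwise (l : List Int) : ∀ (s v : Int), (pvIdxs s l v).Pairwise (· < ·) := by
  induction l with
  | nil => intro s v; simp [pvIdxs]
  | cons x t ih =>
    intro s v
    by_cases hx : x = v
    · simp only [pvIdxs, if_pos hx]
      refine List.pairwise_cons.mpr ⟨?_, ih (s + 1) v⟩
      intro i hi
      have := pvIdxs_ge t (s + 1) i v hi
      omega
    · simpa [pvIdxs, if_neg hx] using ih (s + 1) v

lemma pvIdxs_head (l : List Int) : ∀ (s v : Int), v ∈ l →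
    ∃ t, pvIdxs s l v = (s + (l.idxOf v : Int)) :: t := by
  induction l with
  | nil => intro s v h; simp at h
  | cons x t ih =>
    intro s v hv
    by_cases hx : x = v
    · exact ⟨pvIdxs (s + 1) t v, by simp [pvIdxs, hx, List.idxOf_cons_self]⟩
    · have hvt : v ∈ t := by
        rcases List.mem_cons.mp hv with h | h
        · exact absurd h.symm hx
        · exact h
      obtain ⟨u, hu⟩ := ih (s + 1) v hvt
      refine ⟨u, ?_⟩
      rw [pvIdxs, if_neg hx, hu, List.idxOf_cons_ne _ (fun h => hx h)]
      congr 1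
      push_cast
      ring

-- membership facts for the seen list
lemma pvSeen_mem (xs : List Int) (c : Int) :
    c ∈ pvSeen [] xs ↔ c ∈ xs ∧ c ≠ -1 := by
  rw [pvSeen_nil_eq_dedup, PySem.List.mem_dedup, List.mem_filter]
  simp

lemma pvSeen_nodup (xs : List Int) : (pvSeen [] xs).Nodup := by
  rw [pvSeen_nil_eq_dedup]; exact PySem.List.nodup_dedup _

lemma pvV_perm (xs : List Int) : (pvV xs).Perm (pvSeen [] xs) :=
  PySem.List.sorted_perm _ _ _

lemma pvV_mem (xs : List Int) (c : Int) : c ∈ pvV xs ↔ c ∈ xs ∧ c ≠ -1 := by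
  rw [(pvV_perm xs).mem_iff]; exact pvSeen_mem xs c

lemma pvV_nodup (xs : List Int) : (pvV xs).Nodup :=
  (pvV_perm xs).nodup_iff.mpr (pvSeen_nodup xs)

lemma pvV_pairwise (xs : List Int) : (pvV xs).Pairwise (· < ·) := by
  have h1 : (pvV xs).Pairwise (· ≤ ·) := by
    simpa using PySem.List.sorted_pairwise (pvSeen [] xs) (fun x => x) 
  have h2 : (pvV xs).Pairwise (· ≠ ·) := pvV_nodup xs
  exact (h1.and h2).imp (fun h => lt_of_le_of_ne h.1 h.2)

lemma pvV_not_neg1 (xs : List Int) : (-1 : Int) ∉ pvV xs := by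
  intro h; exact ((pvV_mem xs (-1)).mp h).2 rfl

-- facts about X (the list the port sorts)
lemma pvX_mem (xs : List Int) (p : Int × Int) :
    p ∈ pvX xs ↔ ∃ (k : Nat), ∃ (hk : k < xs.length), xs[k] = p.1 ∧ p.2 = (k : Int) ∧ p.1 ≠ -1 := by
  unfold pvX
  rw [List.mem_map]
  constructor
  · rintro ⟨q, hq, rfl⟩
    rw [List.mem_filter] at hq
    obtain ⟨hq1, hq2⟩ := hq
    obtain ⟨k, hk, rfl⟩ := (PySem.List.mem_enumerate_iff _ _ _).mp hq1
    exact ⟨k, hk, rfl, by simp, by simpa using hq2⟩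
  · rintro ⟨k, hk, h1, h2, h3⟩
    refine ⟨((k : Int), xs[k]), ?_, ?_⟩
    · rw [List.mem_filter]
      refine ⟨(PySem.List.mem_enumerate_iff _ _ _).mpr ⟨k, hk, by simp⟩, by simpa using h1 ▸ h3⟩
    · rcases p with ⟨p1, p2⟩
      simp only at h1 h2
      simp [h1, h2]

lemma pvX_nodup (xs : List Int) : (pvX xs).Nodup := by
  have h : ((pvX xs).map Prod.snd).Pairwise (· < ·) := by
    unfold pvX
    rw [List.map_map]
    refine List.Pairwise.map _ ?_ (List.Pairwise.filter _ (PySem.List.pairwise_lt_enumerate xs 0))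
    intro a b hab
    simpa using hab
  have hnd : ((pvX xs).map Prod.snd).Nodup := h.imp (fun h => ne_of_lt h)
  exact hnd.of_map

-- facts about P (the canonical sorted order)
lemma pvP_mem (xs : List Int) (p : Int × Int) :
    p ∈ pvP xs ↔ p.1 ∈ pvV xs ∧ p.2 ∈ pvIdxs 0 xs p.1 := by
  unfold pvP
  rw [List.mem_flatMap]
  constructor
  · rintro ⟨v, hv, hp⟩
    obtain ⟨i, hi, rfl⟩ := List.mem_map.mp hp
    exact ⟨hv, hi⟩
  · rintro ⟨h1, h2⟩
    exact ⟨p.1, h1, List.mem_map.mpr ⟨p.2, h2, rfl⟩⟩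

lemma pvP_pairwise (xs : List Int) : (pvP xs).Pairwise pvR := by
  unfold pvP
  apply List.pairwise_flatMap.mpr
  constructor
  · intro v _
    refine List.Pairwise.map _ ?_ (pvIdxs_pairwise xs 0 v)
    intro i j hij
    exact Or.inr ⟨rfl, hij⟩
  · refine (pvV_pairwise xs).imp ?_
    intro a b hab x hx y hy
    obtain ⟨i, -, rfl⟩ := List.mem_map.mp hx
    obtain ⟨j, -, rfl⟩ := List.mem_map.mp hy
    exact Or.inl hab

lemma pvP_nodup (xs : List Int) : (pvP xs).Nodup :=
  (pvP_pairwise xs).imp (fun h => pvR_ne _ _ h)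

lemma pvP_perm (xs : List Int) : (pvP xs).Perm (pvX xs) := by
  rw [List.perm_ext_iff_of_nodup (pvP_nodup xs) (pvX_nodup xs)]
  intro p
  rw [pvP_mem, pvX_mem, pvV_mem, pvIdxs_mem]
  constructor
  · rintro ⟨⟨hmem, hne⟩, k, hk, hkv, hi⟩
    exact ⟨k, hk, hkv, by simpa using hi, hkv ▸ hne⟩
  · rintro ⟨k, hk, hkv, hi, hne⟩
    exact ⟨⟨hkv ▸ List.getElem_mem hk, hne⟩, k, hk, hkv, by simpa using hi⟩

lemma pvPairs_eq (xs : List Int) :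
    PySem.List.sorted2 (pvX xs) Prod.fst Prod.snd = pvP xs :=
  sorted2_eq_canon _ _ (pvX_nodup xs) (pvP_perm xs) (pvP_pairwise xs)

-- ---------- stage 2: the firsts sweep ----------

lemma stage2_group (v : Int) (l : List Int) (fs : List Int) :
    ((l.map (fun i => (v, i))).foldl
      (fun (st : List Int × Int) p => if p.1 != st.2 then (st.1 ++ [p.2], p.1) else st) (fs, v))
    = (fs, v) := by
  induction l with
  | nil => simp
  | cons i l ih => simpa using ih

lemma stage2_main (xs : List Int) : ∀ (V fs : List Int) (prev : Int), prev ∉ V →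
    (∀ v ∈ V, v ∈ xs) →
    V.Nodup →
    ((V.flatMap (fun v => (pvIdxs 0 xs v).map (fun i => (v, i)))).foldl
      (fun (st : List Int × Int) p => if p.1 != st.2 then (st.1 ++ [p.2], p.1) else st) (fs, prev))
    = (fs ++ V.map (pvFI xs), V.getLastD prev) := by
  intro V
  induction V with
  | nil => intro fs prev _ _ _; simp
  | cons v V ih =>
    intro fs prev hprev hmem hnd
    obtain ⟨t, ht⟩ := pvIdxs_head xs 0 v (hmem v List.mem_cons_self)
    have hfi : (0 : Int) + (xs.idxOf v : Int) = pvFI xs v := by unfold pvFI; ring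
    rw [List.flatMap_cons, List.foldl_append, ht, hfi]
    have hne : (v != prev) = true := by
      simp only [bne_iff_ne, ne_eq]
      intro h; exact hprev (h ▸ List.mem_cons_self)
    rw [List.map_cons]
    simp only [List.foldl_cons]
    rw [if_pos hne]
    rw [stage2_group v t (fs ++ [pvFI xs v])]
    rw [ih (fs ++ [pvFI xs v]) v (List.nodup_cons.mp hnd).1
        (fun u hu => hmem u (List.mem_cons_of_mem _ hu)) (List.nodup_cons.mp hnd).2]
    refine Prod.ext (by simp) ?_
    cases V with
    | nil => simp
    | cons w W =>
      have h : (w :: W).getLast?.isSome := by simp [List.getLast?_isSome]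
      obtain ⟨x, hx⟩ := Option.isSome_iff_exists.mp h
      simp [hx]

-- ---------- first-occurrence scan: appearance order has increasing first indices ----------

def pvF (s : Int) (acc : List (Int × Int)) : List Int → List (Int × Int)
  | [] => acc
  | x :: l =>
    if x = -1 ∨ x ∈ acc.map Prod.snd then pvF (s + 1) acc l
    else pvF (s + 1) (acc ++ [(s, x)]) l

lemma pvF_snd (l : List Int) : ∀ (s : Int) (acc : List (Int × Int)),
    (pvF s acc l).map Prod.snd = pvSeen (acc.map Prod.snd) l := by
  induction l with
  | nil => intro s acc; simp [pvF, pvSeen]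
  | cons x l ih =>
    intro s acc
    by_cases h : x = -1 ∨ x ∈ acc.map Prod.snd
    · rw [pvF, if_pos h, pvSeen, if_pos h, ih]
    · rw [pvF, if_neg h, pvSeen, if_neg h, ih]
      simp

lemma pvF_fst_pairwise (l : List Int) : ∀ (s : Int) (acc : List (Int × Int)),
    (∀ p ∈ acc, p.1 < s) → ((acc.map Prod.fst).Pairwise (· < ·)) →
    ((pvF s acc l).map Prod.fst).Pairwise (· < ·) := by
  induction l with
  | nil => intro s acc _ h2; simpa [pvF] using h2
  | cons x l ih =>
    intro s acc h1 h2
    by_cases h : x = -1 ∨ x ∈ acc.map Prod.snd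
    · rw [pvF, if_pos h]
      exact ih (s + 1) acc (fun p hp => by have := h1 p hp; omega) h2
    · rw [pvF, if_neg h]
      refine ih (s + 1) (acc ++ [(s, x)]) ?_ ?_
      · intro p hp
        rcases List.mem_append.mp hp with hp | hp
        · have := h1 p hp; omega
        · have := List.mem_singleton.mp hp
          subst this
          dsimp only
          omega
      · rw [List.map_append, List.pairwise_append]
        refine ⟨h2, by simp, ?_⟩
        intro a ha b hb
        obtain ⟨p, hp, rfl⟩ := List.mem_map.mp ha
        simp only [List.map_cons, List.map_nil, List.mem_singleton] at hb
        subst hb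
        exact h1 p hp

lemma pvF_min (l : List Int) : ∀ (s : Int) (acc : List (Int × Int)),
    ∀ p ∈ pvF s acc l, p ∈ acc ∨
      (p.2 ≠ -1 ∧ p.2 ∉ acc.map Prod.snd ∧ p.2 ∈ l ∧ p.1 = s + (l.idxOf p.2 : Int)) := by
  induction l with
  | nil => intro s acc p hp; exact Or.inl (by simpa [pvF] using hp)
  | cons x l ih =>
    intro s acc p hp
    by_cases h : x = -1 ∨ x ∈ acc.map Prod.snd
    · rw [pvF, if_pos h] at hp
      rcases ih (s + 1) acc p hp with hin | ⟨h1, h2, h3, h4⟩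
      · exact Or.inl hin
      · have hne : p.2 ≠ x := by
          rcases h with h | h
          · exact fun he => h1 (he.trans h)
          · exact fun he => h2 (he ▸ h)
        refine Or.inr ⟨h1, h2, List.mem_cons_of_mem _ h3, ?_⟩
        rw [List.idxOf_cons_ne _ (fun he => hne he.symm)]
        push_cast
        omega
    · rw [pvF, if_neg h] at hp
      push_neg at h
      rcases ih (s + 1) (acc ++ [(s, x)]) p hp with hin | ⟨h1, h2, h3, h4⟩
      · rcases List.mem_append.mp hin with hin | hin
        · exact Or.inl hin
        · simp only [List.mem_singleton] at hin
          subst hin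
          exact Or.inr ⟨h.1, h.2, List.mem_cons_self, by simp [List.idxOf_cons_self]⟩
      · rw [List.map_append] at h2
        have h2' : p.2 ∉ acc.map Prod.snd := fun hm => h2 (List.mem_append.mpr (Or.inl hm))
        have hne : p.2 ≠ x := fun he => h2 (List.mem_append.mpr (Or.inr (by simp [he])))
        refine Or.inr ⟨h1, h2', List.mem_cons_of_mem _ h3, ?_⟩
        rw [List.idxOf_cons_ne _ (fun he => hne he.symm)]
        push_cast
        omega

lemma pvSeen_map_fI_pairwise (xs : List Int) :
    (((pvSeen [] xs).map (pvFI xs)).Pairwise (· < ·)) := by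
  have h1 : (pvF 0 [] xs).map Prod.snd = pvSeen [] xs := by
    simpa using pvF_snd xs 0 []
  have h2 : ((pvF 0 [] xs).map Prod.fst).Pairwise (· < ·) :=
    pvF_fst_pairwise xs 0 [] (by simp) (by simp)
  have h3 : ∀ p ∈ pvF 0 [] xs, p.1 = pvFI xs p.2 := by
    intro p hp
    rcases pvF_min xs 0 [] p hp with hin | ⟨-, -, -, h4⟩
    · simp at hin
    · rw [h4]; unfold pvFI; ring
  have : (pvF 0 [] xs).map Prod.fst = ((pvSeen [] xs).map (pvFI xs)) := by
    rw [← h1, List.map_map]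
    exact List.map_congr_left h3
  rw [← this]
  exact h2

lemma firstsS_eq (xs : List Int) :
    PySem.List.sorted ((pvV xs).map (pvFI xs)) (fun x => x)
      = (pvSeen [] xs).map (pvFI xs) := by
  refine PySem.List.sorted_eq_of_perm_of_pairwise_lt _ _ _ ?_ ?_
  · exact ((pvV_perm xs).map (pvFI xs)).symm
  · simpa using pvSeen_map_fI_pairwise xs

-- ---------- the rank array ----------

lemma pyGetD_pySetD_ne (base : List Int) (x v s : Int) (hx : 0 ≤ x) (hv : 0 ≤ v) (hne : v ≠ x) :
    PySem.List.pyGetD (PySem.List.pySetD base x s) v 0 = PySem.List.pyGetD base v 0 := by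
  have h1 := PySem.List.pyGetD_natCast (base.set x.toNat s) v.toNat 0
  have h2 := PySem.List.pyGetD_natCast base v.toNat 0
  rw [Int.toNat_of_nonneg hv] at h1 h2
  rw [PySem.List.pySetD_of_nonneg _ _ hx, h1, h2,
      List.getD_eq_getElem?_getD, List.getD_eq_getElem?_getD,
      List.getElem?_set_ne (by omega)]

lemma pyGetD_pySetD_self (base : List Int) (x s : Int) (hx : 0 ≤ x) (hlt : x < (base.length : Int)) :
    PySem.List.pyGetD (PySem.List.pySetD base x s) x 0 = s := by
  have h1 := PySem.List.pyGetD_natCast (base.set x.toNat s) x.toNat 0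
  rw [Int.toNat_of_nonneg hx] at h1
  rw [PySem.List.pySetD_of_nonneg _ _ hx, h1, List.getD_eq_getElem?_getD,
      List.getElem?_set_self (by omega)]
  rfl

lemma fold_set_unchanged : ∀ (L : List Int) (s : Int) (base : List Int) (v : Int),
    v ∉ L → (∀ y ∈ L, 0 ≤ y) → 0 ≤ v →
    PySem.List.pyGetD ((PySem.List.enumerate L s).foldl
      (fun a p => PySem.List.pySetD a p.2 p.1) base) v 0 = PySem.List.pyGetD base v 0 := by
  intro L
  induction L with
  | nil => intro s base v _ _ _; simp [PySem.List.enumerate]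
  | cons x L ih =>
    intro s base v hv hpos hv0
    rw [PySem.List.enumerate_cons, List.foldl_cons]
    rw [ih (s + 1) _ v (fun h => hv (List.mem_cons_of_mem _ h))
        (fun y hy => hpos y (List.mem_cons_of_mem _ hy)) hv0]
    exact pyGetD_pySetD_ne base x v s (hpos x List.mem_cons_self) hv0
      (fun h => hv (h ▸ List.mem_cons_self))

lemma fold_set_get : ∀ (L : List Int) (s : Int) (base : List Int), L.Nodup →
    (∀ y ∈ L, 0 ≤ y ∧ y < (base.length : Int)) → ∀ v ∈ L,
    PySem.List.pyGetD ((PySem.List.enumerate L s).foldl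
      (fun a p => PySem.List.pySetD a p.2 p.1) base) v 0 = s + (L.idxOf v : Int) := by
  intro L
  induction L with
  | nil => intro s base _ _ v hv; simp at hv
  | cons x L ih =>
    intro s base hnd hb v hv
    rw [PySem.List.enumerate_cons, List.foldl_cons]
    by_cases hvx : v = x
    · subst hvx
      rw [fold_set_unchanged L (s + 1) _ v (List.nodup_cons.mp hnd).1
          (fun y hy => (hb y (List.mem_cons_of_mem _ hy)).1) (hb v List.mem_cons_self).1]
      rw [pyGetD_pySetD_self base v s (hb v List.mem_cons_self).1 (hb v List.mem_cons_self).2]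
      simp [List.idxOf_cons_self]
    · have hvL : v ∈ L := by
        rcases List.mem_cons.mp hv with h | h
        · exact absurd h hvx
        · exact h
      have hlen : (PySem.List.pySetD base x s).length = base.length := PySem.List.length_pySetD _ _ _
      rw [ih (s + 1) (PySem.List.pySetD base x s) (List.nodup_cons.mp hnd).2
          (fun y hy => by rw [hlen]; exact hb y (List.mem_cons_of_mem _ hy)) v hvL]
      rw [List.idxOf_cons_ne _ (fun h => hvx h.symm)]
      push_cast
      ring

lemma idxOf_map_nodup (f : Int → Int) : ∀ (S : List Int), ((S.map f).Nodup) →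
    ∀ v ∈ S, (S.map f).idxOf (f v) = S.idxOf v := by
  intro S
  induction S with
  | nil => intro _ v hv; simp at hv
  | cons u S ih =>
    intro hnd v hv
    by_cases huv : u = v
    · subst huv
      simp [List.idxOf_cons_self]
    · have hvS : v ∈ S := by
        rcases List.mem_cons.mp hv with h | h
        · exact absurd h.symm huv
        · exact h
      have hfuv : f u ≠ f v := by
        intro h
        have : f u ∉ S.map f := (List.nodup_cons.mp (by simpa using hnd)).1
        exact this (h ▸ List.mem_map.mpr ⟨v, hvS, rfl⟩)
      rw [List.map_cons, List.idxOf_cons_ne _ hfuv, List.idxOf_cons_ne _ huv]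
      rw [ih (by simpa using (List.nodup_cons.mp (by simpa using hnd)).2) v hvS]

lemma rank_value (xs : List Int) (v : Int) (hv : v ∈ pvSeen [] xs) :
    PySem.List.pyGetD
      ((PySem.List.enumerate ((pvSeen [] xs).map (pvFI xs))).foldl
        (fun acc p => PySem.List.pySetD acc p.2 p.1) (List.replicate xs.length 0))
      (pvFI xs v) 0
    = ((pvSeen [] xs).idxOf v : Int) := by
  have hnd : ((pvSeen [] xs).map (pvFI xs)).Nodup :=
    (pvSeen_map_fI_pairwise xs).imp (fun h => ne_of_lt h)
  have hb : ∀ y ∈ (pvSeen [] xs).map (pvFI xs),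
      0 ≤ y ∧ y < ((List.replicate xs.length (0 : Int)).length : Int) := by
    intro y hy
    obtain ⟨u, hu, rfl⟩ := List.mem_map.mp hy
    have hux : u ∈ xs := ((pvSeen_mem xs u).mp hu).1
    have := List.idxOf_lt_length_of_mem hux
    unfold pvFI
    constructor
    · positivity
    · simp only [List.length_replicate]
      exact_mod_cast this
  have := fold_set_get ((pvSeen [] xs).map (pvFI xs)) 0 (List.replicate xs.length 0)
      hnd hb (pvFI xs v) (List.mem_map.mpr ⟨v, hv, rfl⟩)
  rw [this, idxOf_map_nodup (pvFI xs) (pvSeen [] xs) hnd v hv]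
  ring

-- ---------- stage 3: the result sweep ----------

lemma stage3_group (rk : List Int) (v j : Int) (l : List Int) : ∀ (res : List Int),
    ((l.map (fun i => (v, i))).foldl
      (fun (st : List Int × Int × Int) p =>
        (PySem.List.pySetD st.1 p.2
          (PySem.List.pyGetD rk (if p.1 != st.2.1 then p.2 else st.2.2) 0),
         if p.1 != st.2.1 then p.1 else st.2.1,
         if p.1 != st.2.1 then p.2 else st.2.2))
      (res, v, j))
    = (l.foldl (fun r i => PySem.List.pySetD r i (PySem.List.pyGetD rk j 0)) res, v, j) := by
  induction l with
  | nil => intro res; simp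
  | cons i l ih =>
    intro res
    rw [List.map_cons, List.foldl_cons, List.foldl_cons]
    simpa using ih (PySem.List.pySetD res i (PySem.List.pyGetD rk j 0))

lemma stage3_main (xs rk : List Int) : ∀ (V : List Int) (res : List Int) (prev f0 : Int),
    prev ∉ V → V.Nodup → (∀ v ∈ V, v ∈ xs) →
    ((V.flatMap (fun v => (pvIdxs 0 xs v).map (fun i => (v, i)))).foldl
      (fun (st : List Int × Int × Int) p =>
        (PySem.List.pySetD st.1 p.2
          (PySem.List.pyGetD rk (if p.1 != st.2.1 then p.2 else st.2.2) 0),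
         if p.1 != st.2.1 then p.1 else st.2.1,
         if p.1 != st.2.1 then p.2 else st.2.2))
      (res, prev, f0)).1
    = V.foldl (fun r v => (pvIdxs 0 xs v).foldl
        (fun r' i => PySem.List.pySetD r' i (PySem.List.pyGetD rk (pvFI xs v) 0)) r) res := by
  intro V
  induction V with
  | nil => intro res prev f0 _ _ _; simp
  | cons v V ih =>
    intro res prev f0 hprev hnd hmem
    obtain ⟨t, ht⟩ := pvIdxs_head xs 0 v (hmem v List.mem_cons_self)
    have hfi : (0 : Int) + (xs.idxOf v : Int) = pvFI xs v := by unfold pvFI; ring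
    rw [hfi] at ht
    have hne : (v != prev) = true := by
      simp only [bne_iff_ne, ne_eq]
      intro h; exact hprev (h ▸ List.mem_cons_self)
    rw [List.flatMap_cons, List.foldl_append, ht, List.map_cons]
    simp only [List.foldl_cons]
    rw [if_pos hne, if_pos hne]
    rw [stage3_group rk v (pvFI xs v) t]
    rw [ih _ v (pvFI xs v) (List.nodup_cons.mp hnd).1 (List.nodup_cons.mp hnd).2
        (fun u hu => hmem u (List.mem_cons_of_mem _ hu))]
    rw [ht, List.foldl_cons]

-- ---------- flat write lists ----------

lemma nested_eq_flat (V : List Int) (idf : Int → List Int) (g : Int → Int) (res : List Int) :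
    V.foldl (fun r v => (idf v).foldl (fun r' i => PySem.List.pySetD r' i (g v)) r) res
    = (V.flatMap (fun v => (idf v).map (fun i => (i, g v)))).foldl
        (fun r p => PySem.List.pySetD r p.1 p.2) res := by
  rw [List.foldl_flatMap]
  congr 1
  funext acc v
  rw [List.foldl_map]

lemma writes_len : ∀ (L : List (Int × Int)) (res : List Int),
    (L.foldl (fun r p => PySem.List.pySetD r p.1 p.2) res).length = res.length := by
  intro L
  induction L with
  | nil => intro res; simp
  | cons p L ih => intro res; rw [List.foldl_cons, ih, PySem.List.length_pySetD]

lemma writes_getElem? : ∀ (L : List (Int × Int)) (val : Int → Int) (res : List Int) (k : Nat),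
    (∀ p ∈ L, 0 ≤ p.1 ∧ p.1 < (res.length : Int) ∧ p.2 = val p.1) → k < res.length →
    (L.foldl (fun r p => PySem.List.pySetD r p.1 p.2) res)[k]?
      = if (k : Int) ∈ L.map Prod.fst then some (val k) else res[k]? := by
  intro L
  induction L with
  | nil => intro val res k _ _; simp
  | cons p L ih =>
    intro val res k hp hk
    have hp0 := hp p List.mem_cons_self
    rw [List.foldl_cons]
    have hlen : (PySem.List.pySetD res p.1 p.2).length = res.length := PySem.List.length_pySetD _ _ _
    rw [ih val _ k (fun q hq => by rw [hlen]; exact hp q (List.mem_cons_of_mem _ hq)) (by omega)]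
    by_cases hmem : (k : Int) ∈ L.map Prod.fst
    · rw [if_pos hmem, if_pos (by rw [List.map_cons]; exact List.mem_cons_of_mem _ hmem)]
    · rw [if_neg hmem]
      rw [PySem.List.pySetD_of_nonneg _ _ hp0.1]
      by_cases hkp : (k : Int) = p.1
      · have hk' : p.1.toNat = k := by omega
        rw [if_pos (by rw [List.map_cons, ← hkp]; exact List.mem_cons_self), ← hk',
            List.getElem?_set_self (by omega), hp0.2.2, Int.toNat_of_nonneg hp0.1]
      · rw [List.getElem?_set_ne (by omega)]
        rw [if_neg (by
          rw [List.map_cons, List.mem_cons]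
          rintro (h | h)
          · exact hkp h
          · exact hmem h)]

-- ---------- assembling B ----------

lemma pvPairs_eq' (xs : List Int) :
    PySem.List.sorted2
      (((PySem.List.enumerate xs).filter (fun p => p.2 != -1)).map (fun p => (p.2, p.1)))
      Prod.fst Prod.snd = pvP xs := pvPairs_eq xs

lemma pvP_def (xs : List Int) :
    pvP xs = (pvV xs).flatMap (fun v => (pvIdxs 0 xs v).map (fun i => (v, i))) := rfl

lemma firsts_corr (xs : List Int) :
    ((pvP xs).foldl
      (fun (st : List Int × Int) p => if p.1 != st.2 then (st.1 ++ [p.2], p.1) else st)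
      ([], -1)).1
    = (pvV xs).map (pvFI xs) := by
  rw [pvP_def, stage2_main xs (pvV xs) [] (-1) (pvV_not_neg1 xs)
      (fun v hv => ((pvV_mem xs v).mp hv).1) (pvV_nodup xs)]
  simp

lemma wl_mem (xs : List Int) (g : Int → Int) (k : Nat) (hk : k < xs.length) :
    ((k : Int) ∈ ((pvV xs).flatMap (fun v => (pvIdxs 0 xs v).map (fun i => (i, g v)))).map Prod.fst)
    ↔ xs[k] ≠ -1 := by
  constructor
  · intro h
    obtain ⟨p, hp, hfst⟩ := List.mem_map.mp h
    obtain ⟨v, hv, hpv⟩ := List.mem_flatMap.mp hp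
    obtain ⟨i, hi, rfl⟩ := List.mem_map.mp hpv
    dsimp only at hfst
    subst hfst
    obtain ⟨k', hk', hkv, hik⟩ := (pvIdxs_mem xs 0 (k : Int) v).mp hi
    have hkk : k' = k := by omega
    subst hkk
    rw [hkv]
    exact ((pvV_mem xs v).mp hv).2
  · intro h
    refine List.mem_map.mpr ⟨((k : Int), g xs[k]), ?_, rfl⟩
    refine List.mem_flatMap.mpr ⟨xs[k], (pvV_mem xs xs[k]).mpr ⟨List.getElem_mem hk, h⟩, ?_⟩
    refine List.mem_map.mpr ⟨(k : Int), ?_, rfl⟩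
    exact (pvIdxs_mem xs 0 (k : Int) xs[k]).mpr ⟨k, hk, rfl, by simp⟩

lemma pvB_eq_M (xs : List Int) : standardize_init_seeds_alt xs = pvM xs := by
  unfold standardize_init_seeds_alt
  dsimp only
  rw [pvPairs_eq' xs, firsts_corr xs, firstsS_eq xs, pvP_def xs]
  rw [stage3_main xs
      ((PySem.List.enumerate ((pvSeen [] xs).map (pvFI xs))).foldl
        (fun acc p => PySem.List.pySetD acc p.2 p.1) (List.replicate xs.length 0))
      (pvV xs) (List.replicate xs.length (-1)) (-1) (-1) (pvV_not_neg1 xs) (pvV_nodup xs)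
      (fun v hv => ((pvV_mem xs v).mp hv).1)]
  rw [nested_eq_flat (pvV xs) (fun v => pvIdxs 0 xs v)
      (fun v => PySem.List.pyGetD
        ((PySem.List.enumerate ((pvSeen [] xs).map (pvFI xs))).foldl
          (fun acc p => PySem.List.pySetD acc p.2 p.1) (List.replicate xs.length 0))
        (pvFI xs v) 0)
      (List.replicate xs.length (-1))]
  apply List.ext_getElem?
  intro k
  by_cases hk : k < xs.length
  · rw [writes_getElem? _ (fun i => (((pvSeen [] xs).idxOf (xs.getD i.toNat (-1)) : Nat) : Int)) _ k
        ?_ (by simpa using hk)]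
    · simp only [wl_mem xs _ k hk]
      unfold pvM
      rw [List.getElem?_map, List.getElem?_eq_getElem hk]
      by_cases hv : xs[k] = -1
      · rw [if_neg (by simpa using hv)]
        simp [hv, List.getElem?_replicate, hk]
      · rw [if_pos hv]
        have : xs.getD ((k : Int)).toNat (-1) = xs[k] := by
          rw [Int.toNat_natCast, List.getD_eq_getElem _ _ hk]
        rw [this]
        simp [hv]
    · intro p hp
      obtain ⟨v, hv, hpv⟩ := List.mem_flatMap.mp hp
      obtain ⟨i, hi, rfl⟩ := List.mem_map.mp hpv
      obtain ⟨k', hk', hkv, hik⟩ := (pvIdxs_mem xs 0 i v).mp hi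
      have hi0 : i = (k' : Int) := by omega
      refine ⟨by omega, ?_, ?_⟩
      · dsimp only
        simp only [List.length_replicate]
        omega
      · dsimp only
        have hvS : v ∈ pvSeen [] xs := (pvSeen_mem xs v).mpr
          ⟨((pvV_mem xs v).mp hv).1, ((pvV_mem xs v).mp hv).2⟩
        rw [rank_value xs v hvS]
        have : xs.getD i.toNat (-1) = v := by
          rw [hi0, Int.toNat_natCast, List.getD_eq_getElem _ _ hk', hkv]
        rw [this]
  · have h1 : ((((pvV xs).flatMap (fun v => (pvIdxs 0 xs v).map (fun i => (i,
        PySem.List.pyGetD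
          ((PySem.List.enumerate ((pvSeen [] xs).map (pvFI xs))).foldl
            (fun acc p => PySem.List.pySetD acc p.2 p.1) (List.replicate xs.length 0))
          (pvFI xs v) 0)))).foldl
        (fun r p => PySem.List.pySetD r p.1 p.2) (List.replicate xs.length (-1)))).length
        = xs.length := by
      rw [writes_len]
      simp
    rw [List.getElem?_eq_none (by omega), List.getElem?_eq_none (by unfold pvM; simp; omega)]

-- ===== VERDICT (by name: the statement is the Claim_ definition above) =====
theorem standardize_init_seeds_spec : Claim_equal_standardize_init_seeds := by
  intro xs _
  show standardize_init_seeds xs = standardize_init_seeds_alt xs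
  rw [pvA_eq_M, pvB_eq_M]
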